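-- pv_equiv track=rewrite | github.com/rubelw/OSSS | src/OSSS/ai/agents/query_data/handlers/data_sharing_agreements_handler.py | _select_data_sharing_agreements_fields
-- ===== SOURCE A (Python) =====
-- from typing import Any, Dict, List, Sequence
--
-- def _select_data_sharing_agreements_fields(
--     rows: Sequence[Dict[str, Any]],
-- ) -> List[str]:
--     if not rows:
--         return []
--
--     preferred_order = [
--         "id",
--         "agreement_code",
--         "name",
--         "vendor_name",
--         "vendor_product",
--         "status",                  # active, pending, expired, archived
--         "start_date",
--         "end_date",
--         "renewal_date",
--         "jurisdiction",
--         "data_categories",         # student, staff, both, etc.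
--         "contains_student_data",
--         "contains_staff_data",
--         "signed_date",
--         "dpa_signed_date",
--         "contract_url",
--         "privacy_policy_url",
--         "notes",
--         "created_at",
--         "updated_at",
--     ]
--
--     all_keys: List[str] = []
--     for r in rows:
--         for k in r.keys():
--             if k not in all_keys:
--                 all_keys.append(k)
--
--     ordered = [k for k in preferred_order if k in all_keys]
--     ordered.extend([k for k in all_keys if k not in ordered])
--     return ordered
-- ===== SOURCE B (Python) =====
-- from typing import Any, Dict, List, Sequence
--
-- def _select_data_sharing_agreements_fields(
--     rows: Sequence[Dict[str, Any]],
-- ) -> List[str]: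
--     if not rows:
--         return []
--
--     preferred_order = [
--         "id",
--         "agreement_code",
--         "name",
--         "vendor_name",
--         "vendor_product",
--         "status",
--         "start_date",
--         "end_date",
--         "renewal_date",
--         "jurisdiction",
--         "data_categories",
--         "contains_student_data",
--         "contains_staff_data",
--         "signed_date",
--         "dpa_signed_date",
--         "contract_url",
--         "privacy_policy_url",
--         "notes",
--         "created_at",
--         "updated_at",
--     ]
--
--     n = len(preferred_order)
--     priority = {k: i for i, k in enumerate(preferred_order)}
--
--     # one pass: rank every key — preferred keys by their priority index,
--     # the rest by n + first-seen position — then one stable sort.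
--     rank: Dict[str, int] = {}
--     for r in rows:
--         for k in r:
--             if k not in rank:
--                 rank[k] = priority.get(k, n + len(rank))
--
--     return sorted(rank, key=lambda k: rank[k])
-- ===== Notes on version B (the rewrite author's own statement) =====
-- stated objective: faster
-- what changed: Replaces A's quadratic list-membership union plus filter-preferred-then-append-complement reordering with a single pass assigning each key a numeric rank (preferred-list index, or 20 + first-seen position) in a dict, followed by one stable sort of the keys by rank.
import Mathlib
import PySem

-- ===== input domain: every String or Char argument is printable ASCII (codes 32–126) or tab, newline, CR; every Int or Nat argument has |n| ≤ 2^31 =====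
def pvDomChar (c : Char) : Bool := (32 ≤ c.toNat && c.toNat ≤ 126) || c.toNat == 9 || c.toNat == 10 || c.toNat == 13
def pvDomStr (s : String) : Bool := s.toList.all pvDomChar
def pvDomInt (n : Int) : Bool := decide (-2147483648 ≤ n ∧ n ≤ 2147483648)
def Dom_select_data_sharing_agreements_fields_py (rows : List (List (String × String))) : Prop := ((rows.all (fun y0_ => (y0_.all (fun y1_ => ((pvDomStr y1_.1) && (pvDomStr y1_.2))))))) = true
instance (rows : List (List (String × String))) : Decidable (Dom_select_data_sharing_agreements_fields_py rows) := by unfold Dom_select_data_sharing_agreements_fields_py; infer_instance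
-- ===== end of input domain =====

-- B replaces A's list-membership union and filter-then-append-complement reordering by a rank dict (preferred
-- index, or 20 + first-seen position) built in one pass and a single stable sort by rank (objective: faster;
-- a timing run measured B faster at the largest generated size).

-- shared literal: the preferred field order (a module constant of the Python function)
def pvPreferred : List String :=
  ["id", "agreement_code", "name", "vendor_name", "vendor_product", "status",
   "start_date", "end_date", "renewal_date", "jurisdiction", "data_categories",
   "contains_student_data", "contains_staff_data", "signed_date", "dpa_signed_date",
   "contract_url", "privacy_policy_url", "notes", "created_at", "updated_at"]

-- ===== PORT A =====
def select_data_sharing_agreements_fields_py (rows : List (List (String × String))) : List String :=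
  if rows = [] then []
  else
    -- all_keys: union of row keys, first-seen order, by membership test on the list
    let all_keys : List String :=
      rows.foldl (fun acc r =>
        ((PySem.Dict.ofList r).keys).foldl
          (fun acc k => if acc.contains k then acc else acc ++ [k]) acc) []
    let ordered : List String := pvPreferred.filter (fun k => all_keys.contains k)
    ordered ++ all_keys.filter (fun k => !(ordered.contains k))

-- ===== PORT B =====
-- priority = {k: i for i, k in enumerate(preferred_order)}
def pvPriority : PySem.Dict String Int :=
  (PySem.List.enumerate pvPreferred).foldl (fun d p => d.insert p.2 p.1) PySem.Dict.empty

def select_data_sharing_agreements_fields_py_alt (rows : List (List (String × String))) : List String :=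
  if rows = [] then []
  else
    let n : Int := (pvPreferred.length : Int)
    -- rank[k] = priority.get(k, n + len(rank)), assigned at k's first appearance
    let rank : PySem.Dict String Int :=
      rows.foldl (fun d r =>
        ((PySem.Dict.ofList r).keys).foldl
          (fun d k => if d.contains k then d
                      else d.insert k (pvPriority.getD k (n + (d.size : Int)))) d)
        PySem.Dict.empty
    -- rank[k] lookup in the sort key never misses, so getD's default is never used
    PySem.List.sorted rank.keys (fun k => rank.getD k 0) false

-- ===== PRECONDITION & SPEC =====
def Spec_select_data_sharing_agreements_fields_py (rows : List (List (String × String))) (out : List String) : Prop := out = select_data_sharing_agreements_fields_py_alt rows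
instance (rows : List (List (String × String))) (out : List String) : Decidable (Spec_select_data_sharing_agreements_fields_py rows out) := by unfold Spec_select_data_sharing_agreements_fields_py; infer_instance

-- ===== CLAIM (what is proved, stated in full; the proofs are below) =====
def Claim_equal_select_data_sharing_agreements_fields_py : Prop := ∀ (rows : List (List (String × String))), Dom_select_data_sharing_agreements_fields_py rows → Spec_select_data_sharing_agreements_fields_py rows (select_data_sharing_agreements_fields_py rows)

-- ===== LEMMAS AND PROOFS =====

-- the flattened stream of row keys, and its first-seen dedup (= A's all_keys)
def pvL (rows : List (List (String × String))) : List String :=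
  rows.flatMap (fun r => (PySem.Dict.ofList r).keys)

def pvS (rows : List (List (String × String))) : List String :=
  PySem.Set.ofList (pvL rows)

-- the items of B's rank dict, as a function of the dedup key list and a position offset
def pvRankItems (ks : List String) (i : Nat) : List (String × Int) :=
  match ks with
  | [] => []
  | k :: t => (k, pvPriority.getD k ((pvPreferred.length : Int) + (i : Int))) :: pvRankItems t (i + 1)

def pvMkRank (ks : List String) : PySem.Dict String Int := PySem.Dict.mk (pvRankItems ks 0)

theorem pvRankItems_fst (ks : List String) (i : Nat) :
    (pvRankItems ks i).map (fun p => p.1) = ks := by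
  induction ks generalizing i with
  | nil => rfl
  | cons k t ih => simp [pvRankItems, ih]

theorem pvRankItems_length (ks : List String) (i : Nat) :
    (pvRankItems ks i).length = ks.length := by
  induction ks generalizing i with
  | nil => rfl
  | cons k t ih => simp [pvRankItems, ih]

theorem pvRankItems_append (ks : List String) (k : String) (i : Nat) :
    pvRankItems (ks ++ [k]) i =
      pvRankItems ks i ++ [(k, pvPriority.getD k ((pvPreferred.length : Int) + ((i + ks.length : Nat) : Int)))] := by
  induction ks generalizing i with
  | nil => simp [pvRankItems]
  | cons a t ih =>
      have h : i + 1 + t.length = i + (t.length + 1) := by omega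
      simp only [List.cons_append, pvRankItems, ih, List.length_cons, h]

theorem pvMkRank_keys (ks : List String) : (pvMkRank ks).keys = ks := by
  simp [pvMkRank, PySem.Dict.keys_mk, pvRankItems_fst]

theorem pvMkRank_contains (ks : List String) (k : String) :
    (pvMkRank ks).contains k = true ↔ k ∈ ks := by
  rw [PySem.Dict.contains_iff_mem_keys, pvMkRank_keys]

theorem pvMkRank_size (ks : List String) : (pvMkRank ks).size = ks.length := by
  simp [pvMkRank, PySem.Dict.size, pvRankItems_length]

-- one step of B's loop preserves the rank-dict shape
theorem pvStep_mkRank (ks : List String) (k : String) :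
    (if (pvMkRank ks).contains k then pvMkRank ks
     else (pvMkRank ks).insert k (pvPriority.getD k ((pvPreferred.length : Int) + ((pvMkRank ks).size : Int))))
      = pvMkRank (PySem.Set.add ks k) := by
  by_cases h : k ∈ ks
  · rw [if_pos ((pvMkRank_contains ks k).mpr h)]
    simp [PySem.Set.add, PySem.Set.contains, h]
  · rw [if_neg (by simp [pvMkRank_contains, h])]
    have hadd : PySem.Set.add ks k = ks ++ [k] := by
      simp [PySem.Set.add, PySem.Set.contains, h]
    rw [hadd]
    simp only [PySem.Dict.insert, pvMkRank_contains, h, if_false, pvMkRank_size]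
    simp [pvMkRank, pvRankItems_append]

theorem pvFold_mkRank (l : List String) (ks : List String) :
    l.foldl (fun d k => if d.contains k then d
              else d.insert k (pvPriority.getD k ((pvPreferred.length : Int) + (d.size : Int)))) (pvMkRank ks)
      = pvMkRank (l.foldl PySem.Set.add ks) := by
  induction l generalizing ks with
  | nil => rfl
  | cons a t ih => simp only [List.foldl_cons, pvStep_mkRank, ih]

-- value stored at a key of the rank dict: 20 + (offset + position of k)
theorem pvMkRank_get? (ks : List String) (i : Nat) (k : String) (hnd : ks.Nodup) (hk : k ∈ ks) :
    (PySem.Dict.mk (pvRankItems ks i)).get? k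
      = some (pvPriority.getD k ((pvPreferred.length : Int) + ((i + ks.idxOf k : Nat) : Int))) := by
  induction ks generalizing i with
  | nil => cases hk
  | cons a t ih =>
      rw [pvRankItems, PySem.Dict.get?_mk_cons]
      by_cases h : a = k
      · subst h
        simp
      · have hk' : k ∈ t := by
          rcases List.mem_cons.mp hk with h1 | h1
          · exact absurd h1.symm h
          · exact h1
        have hne : (a == k) = false := by simp [h]
        rw [hne]
        simp only [if_false, Bool.false_eq_true]
        rw [ih (i + 1) hnd.of_cons hk']
        have : List.idxOf k (a :: t) = t.idxOf k + 1 := by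
          simp [h]
        rw [this]
        congr 2
        push_cast
        ring

-- pvPriority facts, by computation
theorem pvPriority_keys : pvPriority.keys = pvPreferred := by decide

theorem pvPriority_pref : ∀ k ∈ pvPreferred,
    (pvPriority.get? k).isSome = true ∧ (pvPriority.get? k).getD 99 < 20 := by decide

theorem pvPriority_pairwise :
    pvPreferred.Pairwise (fun a b => (pvPriority.get? a).getD 99 < (pvPriority.get? b).getD 99) := by decide

theorem pvPriority_getD_of_mem (k : String) (hk : k ∈ pvPreferred) (v : Int) :
    pvPriority.getD k v = (pvPriority.get? k).getD 99 := by
  obtain ⟨a, ha⟩ := Option.isSome_iff_exists.mp (pvPriority_pref k hk).1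
  simp [PySem.Dict.getD, ha]

theorem pvPriority_getD_of_not_mem (k : String) (hk : k ∉ pvPreferred) (v : Int) :
    pvPriority.getD k v = v := by
  have : pvPriority.get? k = none := by
    rw [PySem.Dict.get?_eq_none_iff_not_mem_keys, pvPriority_keys]; exact hk
  simp [PySem.Dict.getD, this]

-- a nodup list is pairwise strictly increasing in its own idxOf
theorem pvNodup_pairwise_idxOf (l : List String) (h : l.Nodup) :
    l.Pairwise (fun a b => l.idxOf a < l.idxOf b) := by
  induction l with
  | nil => exact List.Pairwise.nil
  | cons a t ih =>
      have hnd := h.of_cons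
      have hna : a ∉ t := (List.nodup_cons.mp h).1
      constructor
      · intro b hb
        have hba : (a == b) = false := by
          simp only [beq_eq_false_iff_ne]
          exact fun e => hna (e ▸ hb)
        simp [List.idxOf_cons, hba]
      · refine (ih hnd).imp_of_mem ?_
        intro x y hx hy hxy
        have hxa : x ≠ a := fun e => hna (e ▸ hx)
        have hya : y ≠ a := fun e => hna (e ▸ hy)
        simpa [List.idxOf_cons, bne, hxa, hya, Ne.symm hxa, Ne.symm hya] using hxy

-- the sort key B uses, evaluated on a member of the dedup list
theorem pvKey_eval (S : List String) (hnd : S.Nodup) (k : String) (hk : k ∈ S) :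
    (pvMkRank S).getD k 0 = pvPriority.getD k ((pvPreferred.length : Int) + (S.idxOf k : Int)) := by
  simp only [PySem.Dict.getD]
  rw [pvMkRank, pvMkRank_get? S 0 k hnd hk]
  simp [PySem.Dict.getD]

-- ===== VERDICT (by name: the statement is the Claim_ definition above) =====
theorem select_data_sharing_agreements_fields_py_spec : Claim_equal_select_data_sharing_agreements_fields_py := by
  intro rows _
  unfold Spec_select_data_sharing_agreements_fields_py
  unfold select_data_sharing_agreements_fields_py select_data_sharing_agreements_fields_py_alt
  by_cases hrows : rows = []
  · simp [hrows]
  · rw [if_neg hrows, if_neg hrows]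
    have hA : rows.foldl (fun acc r =>
        ((PySem.Dict.ofList r).keys).foldl
          (fun acc k => if acc.contains k then acc else acc ++ [k]) acc) ([] : List String) = pvS rows := by
      rw [pvS, PySem.Set.ofList_eq_foldl, pvL, List.foldl_flatMap]
      rfl
    have hB : rows.foldl (fun d r =>
        ((PySem.Dict.ofList r).keys).foldl
          (fun d k => if d.contains k then d
                      else d.insert k (pvPriority.getD k ((pvPreferred.length : Int) + (d.size : Int)))) d)
        PySem.Dict.empty = pvMkRank (pvS rows) := by
      have h0 : (PySem.Dict.empty : PySem.Dict String Int) = pvMkRank [] := rfl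
      rw [h0]
      rw [show rows.foldl (fun d r =>
        ((PySem.Dict.ofList r).keys).foldl
          (fun d k => if d.contains k then d
                      else d.insert k (pvPriority.getD k ((pvPreferred.length : Int) + (d.size : Int)))) d)
        (pvMkRank []) = (pvL rows).foldl
          (fun d k => if d.contains k then d
                      else d.insert k (pvPriority.getD k ((pvPreferred.length : Int) + (d.size : Int))))
          (pvMkRank []) from (List.foldl_flatMap).symm]
      rw [pvFold_mkRank, pvS, PySem.Set.ofList_eq_foldl]
    simp only [hA, hB, pvMkRank_keys]
    have hSnd : (pvS rows).Nodup := PySem.Set.nodup_ofList _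
    have hPnd : pvPreferred.Nodup := by decide
    have hlen : (pvPreferred.length : Int) = 20 := by decide
    have hmemOrd : ∀ k, k ∈ pvPreferred.filter (fun k => (pvS rows).contains k) ↔
        k ∈ pvPreferred ∧ k ∈ pvS rows := by
      intro k; simp [List.mem_filter]
    have hkeyPref : ∀ k ∈ pvPreferred.filter (fun k => (pvS rows).contains k),
        (pvMkRank (pvS rows)).getD k 0 = (pvPriority.get? k).getD 99 := by
      intro k hk
      obtain ⟨hkP, hkS⟩ := (hmemOrd k).mp hk
      rw [pvKey_eval (pvS rows) hSnd k hkS, pvPriority_getD_of_mem k hkP]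
    have hkeyPrefLt : ∀ k ∈ pvPreferred.filter (fun k => (pvS rows).contains k),
        (pvMkRank (pvS rows)).getD k 0 < 20 := by
      intro k hk
      rw [hkeyPref k hk]
      exact (pvPriority_pref k ((hmemOrd k).mp hk).1).2
    have hmemTail : ∀ k ∈ pvS rows,
        k ∉ pvPreferred.filter (fun k => (pvS rows).contains k) ↔ k ∉ pvPreferred := by
      intro k hk
      simp [hk]
    have hkeyTail : ∀ k ∈ (pvS rows).filter
          (fun k => !(pvPreferred.filter (fun k => (pvS rows).contains k)).contains k),
        (pvMkRank (pvS rows)).getD k 0 = 20 + ((pvS rows).idxOf k : Int) := by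
      intro k hk
      obtain ⟨hkS, hkn⟩ := List.mem_filter.mp hk
      have hknP : k ∉ pvPreferred := by
        rcases (by simpa using hkn : k ∉ pvPreferred ∨ k ∉ pvS rows) with h | h
        · exact h
        · exact absurd hkS h
      rw [pvKey_eval (pvS rows) hSnd k hkS, pvPriority_getD_of_not_mem k hknP, hlen]
    have htailEq : (pvS rows).filter
          (fun k => !(pvPreferred.filter (fun k => (pvS rows).contains k)).contains k)
        = (pvS rows).filter (fun k => !pvPreferred.contains k) := by
      apply List.filter_congr
      intro k hk
      have hc : (List.filter (fun k => (pvS rows).contains k) pvPreferred).contains k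
          = pvPreferred.contains k := by
        by_cases hp : k ∈ pvPreferred
        · simp [hp, hk]
        · simp [hp]
      rw [hc]
    have hordPerm : (pvPreferred.filter (fun k => (pvS rows).contains k)).Perm
        ((pvS rows).filter (fun k => pvPreferred.contains k)) := by
      rw [List.perm_ext_iff_of_nodup (hPnd.filter _) (hSnd.filter _)]
      intro a
      simp only [List.mem_filter, List.contains_iff_mem]
      tauto
    have hperm : (pvPreferred.filter (fun k => (pvS rows).contains k) ++
        (pvS rows).filter
          (fun k => !(pvPreferred.filter (fun k => (pvS rows).contains k)).contains k)).Perm (pvS rows) := by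
      rw [htailEq]
      exact (hordPerm.append (List.Perm.refl _)).trans
        (List.filter_append_perm (fun k => pvPreferred.contains k) (pvS rows))
    refine (PySem.List.sorted_eq_of_perm_of_pairwise_lt (pvS rows) _ _ hperm ?_).symm
    rw [List.pairwise_append]
    refine ⟨?_, ?_, ?_⟩
    · refine (pvPriority_pairwise.filter _).imp_of_mem ?_
      intro a b ha hb hab
      rw [hkeyPref a ha, hkeyPref b hb]
      exact hab
    · refine ((pvNodup_pairwise_idxOf (pvS rows) hSnd).filter _).imp_of_mem ?_
      intro a b ha hb hab
      rw [hkeyTail a ha, hkeyTail b hb]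
      omega
    · intro a ha b hb
      have h1 := hkeyPrefLt a ha
      rw [hkeyTail b hb]
      have h2 : (0:Int) ≤ ((pvS rows).idxOf b : Int) := Int.natCast_nonneg _
      omega
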